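-- pv_equiv track=rewrite | github.com/dhfromkorea/nfsp-poker | Programs/actions.py | get_max_bet_bucket
-- ===== SOURCE A (Python) =====
-- class Action:
--     """The possible types of actions"""
--
--     BET_BUCKETS = {
--         -1: (None, None),  # this is fold
--         0: (0, 0),  # this is check
--         # 1: (1, 1),
--         2: (2, 2),
--         3: (3, 4),
--         4: (5, 6),
--         5: (7, 10),
--         6: (11, 14),
--         7: (15, 19),
--         8: (20, 25),
--         9: (26, 30),
--         10: (31, 40),
--         11: (41, 60),
--         12: (61, 80),
--         13: (81, 100),
--         # 14: (101, 200)  # useless ?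
--     }
--
--     def __init__(self, type, value=0, min_raise=None):
--         assert type in {'call', 'check', 'all in', 'fold', 'raise', 'bet', 'null'}
--         self.type = type
--         self.value = value
--         self.min_raise = min_raise
--
--     def __repr__(self):
--         return self.type + ' ' + str(self.value)
--
--     def __eq__(self, other):
--         return (self.type == other.type) and (self.value == other.value) and (self.min_raise == other.min_raise)
--
-- def get_max_bet_bucket(stack):
--     """Returns the biggest bucket you can use to make a bet. Note that it is below the one that leads you to all-in"""
--     assert 0 < stack <= 200
--     if stack == 1:  # you can just go all-in
--         return 14
--     for bucket, range in Action.BET_BUCKETS.items():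
--         if bucket == -1:
--             continue
--         if range[0] <= stack <= range[1]:
--             return bucket
--     return 13
-- ===== SOURCE B (Python) =====
-- def get_max_bet_bucket(stack):
--     """Returns the biggest bucket you can use to make a bet. Note that it is below the one that leads you to all-in"""
--     assert 0 < stack <= 200
--     if stack == 1:  # you can just go all-in
--         return 14
--     if stack > 100:
--         return 13
--     # binary search for the first bucket upper bound >= stack
--     uppers = [2, 4, 6, 10, 14, 19, 25, 30, 40, 60, 80, 100]
--     lo, hi = 0, len(uppers)
--     while lo < hi:
--         mid = (lo + hi) // 2
--         if uppers[mid] < stack: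
--             lo = mid + 1
--         else:
--             hi = mid
--     return lo + 2
-- ===== Notes on version B (the rewrite author's own statement) =====
-- stated objective: alternative
-- what changed: Replaces the linear scan over the BET_BUCKETS dict ranges with a binary search over the sorted list of bucket upper bounds, mapping the found index i to bucket i+2 (edge guards for stack==1 and stack>100 kept).
import Mathlib
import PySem

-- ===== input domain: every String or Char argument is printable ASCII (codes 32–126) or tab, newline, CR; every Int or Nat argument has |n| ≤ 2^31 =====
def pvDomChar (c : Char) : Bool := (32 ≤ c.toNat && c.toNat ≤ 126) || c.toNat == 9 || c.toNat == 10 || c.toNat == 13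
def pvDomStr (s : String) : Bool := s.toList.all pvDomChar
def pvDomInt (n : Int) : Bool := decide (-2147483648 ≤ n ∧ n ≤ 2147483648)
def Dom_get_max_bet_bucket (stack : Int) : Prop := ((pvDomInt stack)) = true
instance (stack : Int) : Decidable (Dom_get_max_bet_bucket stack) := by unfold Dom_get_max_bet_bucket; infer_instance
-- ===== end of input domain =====

-- B replaces A's linear scan over the bucket ranges by a binary search over the
-- sorted bucket upper bounds (objective: alternative algorithm, same exact values).

-- ===== PORT A =====
-- Action.BET_BUCKETS as an insertion-ordered association list; the -1 bucket's
-- (None, None) range is `none` (the loop skips bucket -1 before touching it).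
def pvBetBuckets : List (Int × Option (Int × Int)) :=
  [(-1, none), (0, some (0, 0)), (2, some (2, 2)), (3, some (3, 4)), (4, some (5, 6)),
   (5, some (7, 10)), (6, some (11, 14)), (7, some (15, 19)), (8, some (20, 25)),
   (9, some (26, 30)), (10, some (31, 40)), (11, some (41, 60)), (12, some (61, 80)),
   (13, some (81, 100))]

-- the `for bucket, range in ... items(): ... return 13` loop of A
def pvScanBuckets (stack : Int) : List (Int × Option (Int × Int)) → Int
  | [] => 13
  | (bucket, r) :: rest =>
    if bucket == -1 then pvScanBuckets stack rest  -- continue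
    else
      match r with
      | some (lo, hi) => if lo ≤ stack ∧ stack ≤ hi then bucket else pvScanBuckets stack rest
      | none => pvScanBuckets stack rest  -- unreachable: only bucket -1 has a None range

def get_max_bet_bucket (stack : Int) : Int :=
  if stack == 1 then 14 else pvScanBuckets stack pvBetBuckets

-- ===== PORT B =====
def pvUppers : List Int := [2, 4, 6, 10, 14, 19, 25, 30, 40, 60, 80, 100]

-- the `while lo < hi` binary-search loop of Source B; fuel only makes it total
-- (fuel = hi - lo at the call suffices, since hi - lo shrinks each step)
def pvBisect (fuel : Nat) (stack : Int) (lo hi : Nat) : Nat :=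
  match fuel with
  | 0 => lo
  | fuel + 1 =>
    if lo < hi then
      let mid := (lo + hi) / 2
      if pvUppers.getD mid 0 < stack then pvBisect fuel stack (mid + 1) hi
      else pvBisect fuel stack lo mid
    else lo

def get_max_bet_bucket_alt (stack : Int) : Int :=
  if stack == 1 then 14
  else if 100 < stack then 13
  else (pvBisect pvUppers.length stack 0 pvUppers.length : Int) + 2

-- ===== PRECONDITION & SPEC =====
-- Pre_ is exactly A's assert: on stack ≤ 0 or stack > 200 A raises AssertionError.
def Pre_get_max_bet_bucket (stack : Int) : Prop := 0 < stack ∧ stack ≤ 200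
instance (stack : Int) : Decidable (Pre_get_max_bet_bucket stack) := by
  unfold Pre_get_max_bet_bucket; infer_instance
def pvWitness_get_max_bet_bucket : Int := (50)

def Spec_get_max_bet_bucket (stack : Int) (out : Int) : Prop := out = get_max_bet_bucket_alt stack
instance (stack : Int) (out : Int) : Decidable (Spec_get_max_bet_bucket stack out) := by
  unfold Spec_get_max_bet_bucket; infer_instance

-- ===== CLAIM (what is proved, stated in full; the proofs are below) =====
def Claim_equal_get_max_bet_bucket : Prop := ∀ (stack : Int), Dom_get_max_bet_bucket stack → Pre_get_max_bet_bucket stack → Spec_get_max_bet_bucket stack (get_max_bet_bucket stack)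

-- ===== LEMMAS AND PROOFS =====

-- ===== VERDICT (by name: the statement is the Claim_ definition above) =====
theorem get_max_bet_bucket_spec : Claim_equal_get_max_bet_bucket := by
  intro stack _ hpre
  unfold Spec_get_max_bet_bucket
  obtain ⟨h1, h2⟩ := hpre
  interval_cases stack <;> decide
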